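-- pv_equiv track=rewrite | github.com/Defend-AI-Tech-Inc/agent-discover-scanner | src/agent_discover_scanner/known_apps.py | is_known_desktop_app
-- ===== SOURCE A (Python) =====
-- def is_known_desktop_app(
--     process_name: str,
--     known_apps: frozenset,
-- ) -> bool:
--     """
--     Returns True if process_name matches a known desktop application.
--     Checks exact match and prefix match (for helper processes like
--     'Cursor Helper (Plugin): extension-host...').
--     """
--     if not process_name or not known_apps:
--         return False
--     try:
--         pl = process_name.lower().strip()
--         if pl in known_apps:
--             return True
--         for known in known_apps:
--             if pl.startswith(known):
--                 return True
--     except Exception: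
--         pass
--     return False
-- ===== SOURCE B (Python) =====
-- def is_known_desktop_app(
--     process_name: str,
--     known_apps: frozenset,
-- ) -> bool:
--     if not process_name:
--         return False
--     pl = process_name.lower().strip()
--     return any(pl[:i] in known_apps for i in range(len(pl) + 1))
-- ===== Notes on version B (the rewrite author's own statement) =====
-- stated objective: alternative
-- what changed: Instead of scanning every known app and testing pl.startswith(known), B enumerates the len(pl)+1 prefixes of pl and tests each by frozenset membership, removing the scan over known_apps; it trades O(n*L) scanning for O(L) hash lookups on O(L)-sized keys.
import Mathlib
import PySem

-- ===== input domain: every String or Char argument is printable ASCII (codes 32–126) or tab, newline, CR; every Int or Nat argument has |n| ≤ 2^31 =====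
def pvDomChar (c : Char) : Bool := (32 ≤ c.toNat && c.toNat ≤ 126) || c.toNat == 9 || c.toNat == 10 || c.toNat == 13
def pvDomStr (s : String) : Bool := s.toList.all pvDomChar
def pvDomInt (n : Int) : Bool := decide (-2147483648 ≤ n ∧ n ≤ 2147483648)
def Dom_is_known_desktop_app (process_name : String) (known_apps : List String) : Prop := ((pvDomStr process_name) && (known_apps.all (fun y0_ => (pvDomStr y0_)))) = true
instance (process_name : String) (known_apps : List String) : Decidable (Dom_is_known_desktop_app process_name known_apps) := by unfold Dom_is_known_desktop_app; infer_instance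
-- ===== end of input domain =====

-- B replaces A's scan over known_apps (startswith per element) by enumerating the
-- prefixes of the normalised name and testing each by set membership (alternative algorithm).

-- ===== PORT A =====
def is_known_desktop_app (process_name : String) (known_apps : List String) : Bool :=
  if process_name = "" ∨ known_apps = [] then false
  else
    let pl := PySem.Str.strip (PySem.Str.lower process_name)
    if pl ∈ known_apps then true
    else if known_apps.any (fun known => PySem.Str.startswith pl known) then true
    else false

-- ===== PORT B =====
def is_known_desktop_app_alt (process_name : String) (known_apps : List String) : Bool :=
  if process_name = "" then false
  else
    let pl := PySem.Str.strip (PySem.Str.lower process_name)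
    (List.range ((PySem.Str.len pl).toNat + 1)).any
      (fun i => known_apps.contains (PySem.Str.slice pl none (some (i : Int))))

-- ===== PRECONDITION & SPEC =====
def Spec_is_known_desktop_app (process_name : String) (known_apps : List String) (out : Bool) : Prop := out = is_known_desktop_app_alt process_name known_apps
instance (process_name : String) (known_apps : List String) (out : Bool) : Decidable (Spec_is_known_desktop_app process_name known_apps out) := by unfold Spec_is_known_desktop_app; infer_instance

-- ===== CLAIM (what is proved, stated in full; the proofs are below) =====
def Claim_equal_is_known_desktop_app : Prop := ∀ (process_name : String) (known_apps : List String), Dom_is_known_desktop_app process_name known_apps → Spec_is_known_desktop_app process_name known_apps (is_known_desktop_app process_name known_apps)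

-- ===== LEMMAS AND PROOFS =====

-- A string k ∈ K with k a prefix of pl exists (or pl ∈ K) iff some slice pl[:i], i ≤ len pl, is in K.
lemma key (pl : String) (K : List String) :
    ((pl ∈ K) ∨ (∃ k ∈ K, PySem.Str.startswith pl k = true)) ↔
      (∃ i < (PySem.Str.len pl).toNat + 1,
        K.contains (PySem.Str.slice pl none (some (i : Int))) = true) := by
  have hlen : (PySem.Str.len pl).toNat = pl.toList.length := by simp
  have hslice : ∀ i : Nat, (PySem.Str.slice pl none (some (i : Int))).toList = pl.toList.take i := by
    intro i; simp [PySem.List.slice_to_natCast]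
  constructor
  · rintro (h | ⟨k, hk, hs⟩)
    · refine ⟨pl.toList.length, by omega, ?_⟩
      have : PySem.Str.slice pl none (some (pl.toList.length : Int)) = pl := by
        apply String.toList_injective; rw [hslice]; simp
      rw [this]; simpa using h
    · have hpre : k.toList <+: pl.toList := by
        simpa [PySem.Chars.startswith_iff] using hs
      refine ⟨k.toList.length, by have := hpre.length_le; omega, ?_⟩
      have : PySem.Str.slice pl none (some (k.toList.length : Int)) = k := by
        apply String.toList_injective; rw [hslice]
        exact (List.prefix_iff_eq_take.mp hpre).symm
      rw [this]; simpa using hk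
  · rintro ⟨i, _, hc⟩
    right
    refine ⟨PySem.Str.slice pl none (some (i : Int)), by simpa [List.contains_eq_mem] using hc, ?_⟩
    simp [PySem.Chars.startswith_iff, hslice i, List.take_prefix]

-- ===== VERDICT (by name: the statement is the Claim_ definition above) =====
theorem is_known_desktop_app_spec : Claim_equal_is_known_desktop_app := by
  intro pn K _
  unfold Spec_is_known_desktop_app is_known_desktop_app is_known_desktop_app_alt
  by_cases h1 : pn = ""
  · simp [h1]
  · by_cases h2 : K = []
    · simp [h1, h2]
    · simp only [h1, h2, or_self, if_neg, not_false_iff]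
      rw [Bool.eq_iff_iff]
      simp only [List.any_eq_true, List.mem_range, Bool.if_true_left, Bool.or_eq_true,
        decide_eq_true_eq, Bool.false_eq_true, or_false]
      exact key _ K
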